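-- pv_equiv track=rewrite | github.com/arcadecoffee/advent-2015 | day24/src.py | find_good_combos
-- ===== SOURCE A (Python) =====
-- import itertools
-- from typing import Dict, List
--
-- def has_valid_combo(items: List[int], target: int) -> bool:
--     for set_size in range(1, len(items) - 1):
--         for c in itertools.combinations(items, set_size):
--             if sum(c) == target:
--                 return True
--     return False
--
-- def find_good_combos(data: List[int], target: int):
--     combos = []
--     set_size = 1
--     while not combos and set_size < len(data):
--         for c in itertools.combinations(data, set_size):
--             if sum(c) == target and has_valid_combo([d for d in data if d not in c], target):
--                 combos.append(c)
--         set_size += 1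
--     return combos
-- ===== SOURCE B (Python) =====
-- def _combos_sum(lst, k, t):
--     # combinations of lst of size k (positional, itertools order) whose sum is t
--     if k == 0:
--         return [()] if t == 0 else []
--     if len(lst) < k:
--         return []
--     x, rest = lst[0], lst[1:]
--     return [(x,) + c for c in _combos_sum(rest, k - 1, t - x)] + _combos_sum(rest, k, t)
--
-- def _splittable(items, t):
--     # size-constrained subset-sum DP: some subset of 1..len(items)-2 elements sums to t
--     n = len(items)
--     if n < 3:
--         return False
--     reach = {(0, 0)}
--     for x in items:
--         reach |= {(s + x, k + 1) for (s, k) in reach}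
--     return any(s == t and 1 <= k <= n - 2 for (s, k) in reach)
--
-- def find_good_combos(data, target):
--     for k in range(1, len(data)):
--         combos = [c for c in _combos_sum(data, k, target)
--                   if _splittable([d for d in data if d not in c], target)]
--         if combos:
--             return combos
--     return []
-- ===== Notes on version B (the rewrite author's own statement) =====
-- stated objective: alternative
-- what changed: A generates all size-k combinations and validates each remainder with an exponential scan over all combination sizes; B fuses the sum constraint into the combination generator and replaces the validity scan with a reachability set over (sum, size) pairs (size-constrained subset-sum DP).
import Mathlib
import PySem

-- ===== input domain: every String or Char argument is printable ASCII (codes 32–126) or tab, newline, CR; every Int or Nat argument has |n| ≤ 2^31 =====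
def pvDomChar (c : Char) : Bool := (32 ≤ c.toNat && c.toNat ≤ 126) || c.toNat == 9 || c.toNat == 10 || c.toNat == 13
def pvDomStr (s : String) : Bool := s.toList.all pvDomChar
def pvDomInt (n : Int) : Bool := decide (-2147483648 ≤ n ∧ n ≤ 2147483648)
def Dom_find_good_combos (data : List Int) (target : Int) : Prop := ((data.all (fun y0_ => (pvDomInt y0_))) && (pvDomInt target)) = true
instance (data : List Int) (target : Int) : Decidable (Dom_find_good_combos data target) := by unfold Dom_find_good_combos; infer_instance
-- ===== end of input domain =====

-- B replaces A's exponential has_valid_combo with a (sum,size)-reachability set and fuses the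
-- sum filter into the combination generator; same return value everywhere (objective: alternative).

-- ===== PORT A =====
-- itertools.combinations(l, k) (no PySem primitive; hand-ported, exact: lexicographic by index)
def pyCombinations : List Int → Nat → List (List Int)
  | _, 0 => [[]]
  | [], _ + 1 => []
  | x :: xs, k + 1 => (pyCombinations xs k).map (fun c => x :: c) ++ pyCombinations xs (k + 1)

-- for set_size in range(1, len(items)-1): for c in combinations(items, set_size): if sum(c)==target: return True
def has_valid_combo (items : List Int) (target : Int) : Bool :=
  (PySem.List.pyRange 1 ((items.length : Int) - 1) 1).any (fun s =>
    (pyCombinations items s.toNat).any (fun c => c.sum == target))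

-- one body of A's while loop (combos is [] at every entry since the loop runs only while combos is empty)
def fgcStep (data : List Int) (target : Int) (set_size : Nat) : List (List Int) :=
  (pyCombinations data set_size).foldl (fun combos c =>
    if c.sum == target && has_valid_combo (data.filter (fun d => !(List.contains c d))) target
    then combos ++ [c] else combos) []

-- while not combos and set_size < len(data): … ; fuel = number of remaining set_size values
def fgcGo (data : List Int) (target : Int) (set_size : Nat) : Nat → List (List Int)
  | 0 => []
  | fuel + 1 =>
    let combos := fgcStep data target set_size
    if combos.isEmpty then fgcGo data target (set_size + 1) fuel else combos

def find_good_combos (data : List Int) (target : Int) : List (List Int) :=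
  fgcGo data target 1 (data.length - 1)

-- ===== PORT B =====
-- _combos_sum: combinations of size k summing to t, sum check fused into the recursion
def combosSum : List Int → Nat → Int → List (List Int)
  | _, 0, t => if t == 0 then [[]] else []
  | [], _ + 1, _ => []
  | x :: rest, k + 1, t =>
    if (x :: rest).length < k + 1 then [] else
    (combosSum rest k (t - x)).map (fun c => x :: c) ++ combosSum rest (k + 1) t

-- _splittable: DP over the set of reachable (sum, size) pairs
def splittable (items : List Int) (t : Int) : Bool :=
  if items.length < 3 then false else
  let reach : PySem.Set (Int × Int) :=
    items.foldl (fun r x => PySem.Set.update r (r.map (fun p => (p.1 + x, p.2 + 1))))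
      (PySem.Set.ofList [((0 : Int), (0 : Int))])
  reach.any (fun p => p.1 == t && decide (1 ≤ p.2) && decide (p.2 ≤ (items.length : Int) - 2))

-- for k in range(1, len(data)): … if combos: return combos
def altGo (data : List Int) (target : Int) : List Int → List (List Int)
  | [] => []
  | k :: ks =>
    let combos := (combosSum data k.toNat target).filter
      (fun c => splittable (data.filter (fun d => !(List.contains c d))) target)
    if combos.isEmpty then altGo data target ks else combos

def find_good_combos_alt (data : List Int) (target : Int) : List (List Int) :=
  altGo data target (PySem.List.pyRange 1 (data.length : Int) 1)

-- ===== PRECONDITION & SPEC =====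
def Spec_find_good_combos (data : List Int) (target : Int) (out : List (List Int)) : Prop := out = find_good_combos_alt data target
instance (data : List Int) (target : Int) (out : List (List Int)) : Decidable (Spec_find_good_combos data target out) := by unfold Spec_find_good_combos; infer_instance

-- ===== CLAIM (what is proved, stated in full; the proofs are below) =====
def Claim_equal_find_good_combos : Prop := ∀ (data : List Int) (target : Int), Dom_find_good_combos data target → Spec_find_good_combos data target (find_good_combos data target)

-- ===== LEMMAS AND PROOFS =====

theorem mem_pyCombinations (l : List Int) (k : Nat) (c : List Int) :
    c ∈ pyCombinations l k ↔ c.Sublist l ∧ c.length = k := by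
  induction l generalizing k c with
  | nil =>
    cases k with
    | zero => simp [pyCombinations, List.sublist_nil]
    | succ k =>
      simp only [pyCombinations, List.not_mem_nil, false_iff, List.sublist_nil]
      rintro ⟨rfl, h⟩; simp at h
  | cons x xs ih =>
    cases k with
    | zero =>
      simp [pyCombinations, List.length_eq_zero_iff]
      rintro rfl; exact List.nil_sublist _
    | succ k =>
      simp only [pyCombinations, List.mem_append, List.mem_map, ih, List.sublist_cons_iff]
      constructor
      · rintro (⟨c', ⟨hs, hl⟩, rfl⟩ | ⟨hs, hl⟩)
        · exact ⟨Or.inr ⟨c', rfl, hs⟩, by simp [hl]⟩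
        · exact ⟨Or.inl hs, hl⟩
      · rintro ⟨hs | ⟨r, rfl, hr⟩, hl⟩
        · exact Or.inr ⟨hs, hl⟩
        · exact Or.inl ⟨r, ⟨hr, by simpa using hl⟩, rfl⟩

theorem pyCombinations_eq_nil (l : List Int) (k : Nat) (h : l.length < k) :
    pyCombinations l k = [] := by
  rw [List.eq_nil_iff_forall_not_mem]
  intro c hc
  rw [mem_pyCombinations] at hc
  have := hc.1.length_le
  omega

theorem combosSum_eq (l : List Int) (k : Nat) (t : Int) :
    combosSum l k t = (pyCombinations l k).filter (fun c => c.sum == t) := by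
  induction l generalizing k t with
  | nil =>
    cases k with
    | zero =>
      rw [combosSum]; simp only [pyCombinations, List.filter_cons, List.filter_nil, List.sum_nil]
      rcases eq_or_ne t 0 with h | h
      · subst h; simp
      · simp [h, Ne.symm h]
    | succ k => simp [combosSum, pyCombinations]
  | cons x xs ih =>
    cases k with
    | zero =>
      rw [combosSum]; simp only [pyCombinations, List.filter_cons, List.filter_nil, List.sum_nil]
      rcases eq_or_ne t 0 with h | h
      · subst h; simp
      · simp [h, Ne.symm h]
    | succ k =>
      rw [combosSum]
      split
      · next h =>
        rw [pyCombinations_eq_nil _ _ (by simpa using h)]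
        simp
      · next h =>
        rw [pyCombinations, List.filter_append, List.filter_map, ih, ih]
        congr 1
        congr 1
        apply List.filter_congr
        intro c hc
        rw [Bool.eq_iff_iff]
        simp only [Function.comp, List.sum_cons, beq_iff_eq]
        omega

theorem mem_reach (items : List Int) (r : PySem.Set (Int × Int)) (p : Int × Int) :
    p ∈ items.foldl (fun r x => PySem.Set.update r (r.map (fun p => (p.1 + x, p.2 + 1)))) r ↔
      ∃ c : List Int, c.Sublist items ∧ ∃ q ∈ r, p = (q.1 + c.sum, q.2 + c.length) := by
  induction items generalizing r with
  | nil =>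
    simp only [List.foldl_nil, List.sublist_nil]
    constructor
    · intro hp; exact ⟨[], rfl, p, hp, by simp⟩
    · rintro ⟨c, rfl, q, hq, rfl⟩; simpa using hq
  | cons x xs ih =>
    simp only [List.foldl_cons, ih, PySem.Set.mem_update, List.mem_map, List.sublist_cons_iff]
    constructor
    · rintro ⟨c, hc, q, (hq | ⟨q', hq', rfl⟩), rfl⟩
      · exact ⟨c, Or.inl hc, q, hq, rfl⟩
      · exact ⟨x :: c, Or.inr ⟨c, rfl, hc⟩, q', hq', by simp; constructor <;> ring⟩
    · rintro ⟨c, (hc | ⟨r', rfl, hr'⟩), q, hq, rfl⟩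
      · exact ⟨c, hc, q, Or.inl hq, rfl⟩
      · exact ⟨r', hr', (q.1 + x, q.2 + 1), Or.inr ⟨q, hq, rfl⟩, by simp; constructor <;> ring⟩

theorem splittable_eq (items : List Int) (t : Int) :
    splittable items t = has_valid_combo items t := by
  rw [Bool.eq_iff_iff]
  unfold splittable has_valid_combo
  split
  · next h =>
    rw [PySem.List.pyRange_one_eq_nil (by omega)]
    simp
  · next h =>
    simp only [List.any_eq_true, PySem.List.mem_pyRange_one, mem_pyCombinations, mem_reach,
      PySem.Set.mem_ofList, List.mem_singleton, Bool.and_eq_true, decide_eq_true_eq, beq_iff_eq]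
    constructor
    · rintro ⟨p, ⟨c, hc, q, hq, rfl⟩, ⟨h1, h2⟩, h3⟩
      subst hq
      simp only at h1 h2 h3
      exact ⟨(c.length : Int), ⟨by omega, by omega⟩, c, ⟨hc, by simp⟩, by omega⟩
    · rintro ⟨s, ⟨hs1, hs2⟩, c, ⟨hc, hlen⟩, hsum⟩
      exact ⟨(c.sum, (c.length : Int)), ⟨c, hc, (0, 0), rfl, by simp⟩, ⟨by simpa using hsum, by omega⟩, by omega⟩

theorem step_eq (data : List Int) (target : Int) (k : Nat) :
    fgcStep data target k = (combosSum data k target).filter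
      (fun c => splittable (data.filter (fun d => !(List.contains c d))) target) := by
  unfold fgcStep
  rw [PySem.List.foldl_append_if
    (fun c => c.sum == target && has_valid_combo (data.filter (fun d => !(List.contains c d))) target)
    (fun c => c) (pyCombinations data k) []]
  rw [combosSum_eq, List.filter_filter, List.nil_append, List.map_id']
  apply List.filter_congr
  intro c _
  rw [splittable_eq, Bool.and_comm]

theorem loop_eq (fuel : Nat) (s : Nat) (data : List Int) (target : Int) :
    fgcGo data target s fuel = altGo data target (PySem.List.pyRange (s : Int) ((s : Int) + (fuel : Int)) 1) := by
  induction fuel generalizing s with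
  | zero =>
    rw [PySem.List.pyRange_one_eq_nil (by omega)]
    rfl
  | succ fuel ih =>
    rw [PySem.List.pyRange_one_cons (by omega)]
    show (let combos := fgcStep data target s;
      if combos.isEmpty then fgcGo data target (s + 1) fuel else combos) = _
    rw [altGo]
    simp only [Int.toNat_natCast, ← step_eq]
    by_cases hempty : (fgcStep data target s).isEmpty
    · simp only [hempty, if_true]
      rw [ih (s + 1)]
      congr 2
      push_cast
      ring
    · simp [hempty]

-- ===== VERDICT (by name: the statement is the Claim_ definition above) =====
theorem find_good_combos_spec : Claim_equal_find_good_combos := by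
  intro data target _
  show find_good_combos data target = find_good_combos_alt data target
  unfold find_good_combos find_good_combos_alt
  rw [loop_eq]
  congr 1
  cases data with
  | nil => simp
  | cons x xs => congr 1; simp; omega
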